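-- pv_equiv track=rewrite | github.com/acidburn0zzz/build-postmarketos-org | bpo/helpers/job.py | remove_additional_indent
-- ===== SOURCE A (Python) =====
-- def remove_additional_indent(script, spaces=12):
--     """ Remove leading spaces and leading/trailing empty lines from script
--         parameter. This is used, so we can use additional indents when
--         embedding shell code in the python code. """
--     ret = ""
--     for line in script.split("\n"):
--         # Remove leading empty lines
--         if not line and not ret:
--             continue
--
--         # Remove additional indent from line
--         if line[:spaces] == " " * spaces:
--             ret += line[spaces:] + "\n"
--         else:  # Line does not start with indent
--             ret += line + "\n"
--
--     # Always have one new line at the end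
--     ret += "\n"
--
--     # Remove trailing empty lines
--     while ret.endswith("\n\n"):
--         ret = ret[:-1]
--
--     return ret
-- ===== SOURCE B (Python) =====
-- def remove_additional_indent(script, spaces=12):
--     """Three separate passes (drop leading empties, dedent, drop trailing
--     empties) instead of A's interleaved accumulator loop with a trailing
--     while-trim."""
--     lines = script.split("\n")
--     i = 0
--     while i < len(lines) and not lines[i]:
--         i += 1
--     out = [line[spaces:] if line[:spaces] == " " * spaces else line
--            for line in lines[i:]]
--     while out and not out[-1]:
--         out.pop()
--     return "\n".join(out) + "\n"
-- ===== Notes on version B (the rewrite author's own statement) =====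
-- stated objective: simpler
-- what changed: A's single interleaved loop (skip-flag via empty accumulator, string concatenation, then a character-by-character while-trim of trailing newlines) is replaced by three separate list passes - drop leading empty lines, dedent each line, drop trailing empty lines - followed by a single join.
import Mathlib
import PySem

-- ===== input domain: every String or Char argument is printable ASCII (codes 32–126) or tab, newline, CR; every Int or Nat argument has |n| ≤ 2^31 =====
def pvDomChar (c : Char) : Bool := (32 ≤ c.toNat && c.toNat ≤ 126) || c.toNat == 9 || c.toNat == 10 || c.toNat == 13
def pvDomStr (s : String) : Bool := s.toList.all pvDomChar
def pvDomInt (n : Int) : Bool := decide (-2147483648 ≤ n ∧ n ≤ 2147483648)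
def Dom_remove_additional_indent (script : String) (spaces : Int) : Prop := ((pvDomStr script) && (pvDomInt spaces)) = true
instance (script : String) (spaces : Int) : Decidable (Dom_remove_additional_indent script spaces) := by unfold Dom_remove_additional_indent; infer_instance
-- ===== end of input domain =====

-- B replaces A's single interleaved loop (skip-while-accumulator-empty flag, string append,
-- trailing while-trim on the built string) by three separate list passes (drop leading empty
-- lines, dedent each line, drop trailing empty lines) and one join; objective: simpler.

-- ===== PORT A =====
-- the expression "line[spaces:] if line[:spaces] == ' ' * spaces else line",
-- textually shared by both Pythons
def pvDedent (line : List Char) (spaces : Int) : List Char :=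
  if PySem.List.slice line none (some spaces) = PySem.List.pyRepeat [' '] spaces
  then PySem.List.slice line (some spaces) none
  else line

-- "while ret.endswith('\n\n'): ret = ret[:-1]"
def pvTrim (ret : List Char) : List Char :=
  if PySem.Chars.endswith ret ['\n', '\n'] then pvTrim (PySem.List.slice ret none (some (-1))) else ret
termination_by ret.length
decreasing_by
  have h2 : ['\n', '\n'] <:+ ret := (PySem.Chars.endswith_iff ret ['\n', '\n']).mp ‹_›
  have := h2.length_le
  simp only [PySem.List.slice_to_neg_one, List.length_dropLast, List.length_cons,
    List.length_nil] at *
  omega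

def remove_additional_indent (script : String) (spaces : Int) : String :=
  let ret := (PySem.Chars.splitOn script.toList ['\n']).foldl
      (fun ret line =>
        if line = [] ∧ ret = [] then ret                       -- "if not line and not ret: continue"
        else ret ++ pvDedent line spaces ++ ['\n']) []
  String.ofList (pvTrim (ret ++ ['\n']))                       -- "ret += '\n'" then the while-trim

-- ===== PORT B =====
-- "i = 0; while i < len(lines) and not lines[i]: i += 1" followed by "lines[i:]"
def pvSkipLeadingEmpty (lines : List (List Char)) : List (List Char) :=
  lines.dropWhile (fun l => decide (l = []))

-- "while out and not out[-1]: out.pop()"  (out nonempty with empty last entry ⟺ getLast? = some [])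
def pvDropTrailingEmpty (out : List (List Char)) : List (List Char) :=
  if out.getLast? = some ([] : List Char) then pvDropTrailingEmpty out.dropLast else out
termination_by out.length
decreasing_by
  have : out ≠ [] := by intro h; subst h; simp at *
  simp only [List.length_dropLast]
  have := List.length_pos_iff.mpr this
  omega

def remove_additional_indent_alt (script : String) (spaces : Int) : String :=
  let lines := PySem.Chars.splitOn script.toList ['\n']
  let rest := pvSkipLeadingEmpty lines
  let out := rest.map (fun line => pvDedent line spaces)
  let out := pvDropTrailingEmpty out
  String.ofList (PySem.Chars.join ['\n'] out ++ ['\n'])        -- '"\n".join(out) + "\n"'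

-- ===== PRECONDITION & SPEC =====
def Spec_remove_additional_indent (script : String) (spaces : Int) (out : String) : Prop := out = remove_additional_indent_alt script spaces
instance (script : String) (spaces : Int) (out : String) : Decidable (Spec_remove_additional_indent script spaces out) := by unfold Spec_remove_additional_indent; infer_instance

-- ===== CLAIM (what is proved, stated in full; the proofs are below) =====
def Claim_equal_remove_additional_indent : Prop := ∀ (script : String) (spaces : Int), Dom_remove_additional_indent script spaces → Spec_remove_additional_indent script spaces (remove_additional_indent script spaces)

-- ===== LEMMAS AND PROOFS =====

-- pieces produced by splitOn with a single-character separator never contain that character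
theorem pv_go_no_sep (c : Char) (fuel : Nat) :
    ∀ (l cur : List Char) (acc : List (List Char)), l.length < fuel → c ∉ cur →
      (∀ p ∈ acc, c ∉ p) → ∀ p ∈ PySem.Chars.splitOn.go [c] fuel l cur acc, c ∉ p := by
  induction fuel with
  | zero => intro l cur acc h; omega
  | succ n ih =>
    intro l cur acc hlen hcur hacc p hp
    match l, hlen with
    | [], _ =>
      rw [PySem.Chars.splitOn.go] at hp
      case x_5 => omega
      simp at hp
      rcases hp with h | h
      · exact hacc p h
      · subst h; simpa using hcur
    | ch :: rest, hlen =>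
      rw [PySem.Chars.splitOn.go] at hp
      by_cases hc : c = ch
      · subst hc
        simp [List.isPrefixOf] at hp
        refine ih rest [] (cur.reverse :: acc) (by simp at hlen; omega) (by simp) ?_ p hp
        intro q hq
        simp at hq
        rcases hq with h | h
        · subst h; simpa using hcur
        · exact hacc q h
      · simp [List.isPrefixOf, hc] at hp
        refine ih rest (ch :: cur) acc (by simp at hlen; omega) ?_ hacc p hp
        simp [hcur, hc]

theorem pv_splitOn_no_sep (s : List Char) (c : Char) :
    ∀ p ∈ PySem.Chars.splitOn s [c], c ∉ p := by
  rw [PySem.Chars.splitOn]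
  exact pv_go_no_sep c (s.length + 1) s [] [] (by omega) (by simp) (by simp)

theorem pv_dedent_no_nl (l : List Char) (spaces : Int) (h : '\n' ∉ l) :
    '\n' ∉ pvDedent l spaces := by
  unfold pvDedent
  split
  · intro hm; exact h (PySem.List.mem_of_mem_slice l _ _ hm)
  · exact h

-- A's loop, once the accumulator is nonempty, just appends every dedented line plus '\n'
theorem pv_foldl_nonempty (spaces : Int) (ls : List (List Char)) :
    ∀ acc : List Char, acc ≠ [] →
      ls.foldl (fun ret line => if line = [] ∧ ret = [] then ret
                                else ret ++ pvDedent line spaces ++ ['\n']) acc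
        = acc ++ ls.flatMap (fun l => pvDedent l spaces ++ ['\n']) := by
  induction ls with
  | nil => intro acc _; simp
  | cons l ls ih =>
    intro acc hacc
    simp only [List.foldl_cons, List.flatMap_cons]
    rw [if_neg (by simp [hacc]), ih _ (by simp)]
    simp

-- A's loop from the empty accumulator = drop the leading empty lines, then concatenate
theorem pv_foldl_eq_flatMap (spaces : Int) (ls : List (List Char)) :
    ls.foldl (fun ret line => if line = [] ∧ ret = [] then ret
                              else ret ++ pvDedent line spaces ++ ['\n']) []
      = (ls.dropWhile (fun l => decide (l = []))).flatMap (fun l => pvDedent l spaces ++ ['\n']) := by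
  induction ls with
  | nil => simp
  | cons l ls ih =>
    by_cases hl : l = []
    · subst hl
      simpa using ih
    · rw [List.dropWhile_cons_of_neg (by simpa using hl)]
      simp only [List.foldl_cons, List.flatMap_cons]
      rw [if_neg (by simp [hl])]
      rw [pv_foldl_nonempty spaces ls _ (by simp)]
      simp

theorem pv_trim_snoc_nl (x : List Char) :
    pvTrim (x ++ ['\n', '\n']) = pvTrim (x ++ ['\n']) := by
  rw [pvTrim]
  rw [if_pos (by rw [PySem.Chars.endswith_iff]; exact ⟨x, rfl⟩)]
  congr 1
  rw [PySem.List.slice_to_neg_one]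
  rw [show x ++ ['\n', '\n'] = (x ++ ['\n']) ++ ['\n'] by simp]
  exact List.dropLast_concat

theorem pv_trim_of_not_end (y : List Char) (h : ¬ (['\n', '\n'] <:+ y)) : pvTrim y = y := by
  rw [pvTrim, if_neg]
  simp only [PySem.Chars.endswith_iff]
  exact h

theorem pv_not_end_nl (x m : List Char) (hm : m ≠ []) (hn : '\n' ∉ m) :
    ¬ (['\n', '\n'] <:+ x ++ m ++ ['\n']) := by
  rintro ⟨t, ht⟩
  have h1 : (t ++ ['\n', '\n']).dropLast = ((x ++ m) ++ ['\n']).dropLast := by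
    rw [ht]
  rw [show t ++ ['\n', '\n'] = (t ++ ['\n']) ++ ['\n'] by simp, List.dropLast_concat,
    List.dropLast_concat] at h1
  have h2 : (t ++ ['\n']).getLast? = (x ++ m).getLast? := by rw [h1]
  rw [List.getLast?_concat, List.getLast?_append_of_ne_nil _ hm] at h2
  exact hn (List.mem_of_getLast? (Eq.symm h2))

theorem pv_join_snoc (ms : List (List Char)) (m : List Char) :
    PySem.Chars.join ['\n'] (ms ++ [m]) = ms.flatMap (fun l => l ++ ['\n']) ++ m := by
  induction ms with
  | nil => simp [PySem.Chars.join, List.intercalate]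
  | cons p ms ih =>
    cases ms with
    | nil => simp [PySem.Chars.join, List.intercalate]
    | cons q ms' =>
      rw [show (p :: q :: ms') ++ [m] = p :: q :: (ms' ++ [m]) by simp,
        PySem.Chars.join_cons_cons,
        show q :: (ms' ++ [m]) = (q :: ms') ++ [m] by simp, ih]
      simp

theorem pv_dropTrail_snoc_empty (ms : List (List Char)) :
    pvDropTrailingEmpty (ms ++ [[]]) = pvDropTrailingEmpty ms := by
  rw [pvDropTrailingEmpty, if_pos (by rw [List.getLast?_concat]), List.dropLast_concat]

theorem pv_dropTrail_snoc_ne (ms : List (List Char)) (m : List Char) (hm : m ≠ []) :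
    pvDropTrailingEmpty (ms ++ [m]) = ms ++ [m] := by
  rw [pvDropTrailingEmpty, if_neg (by rw [List.getLast?_concat]; simpa using hm)]

-- the heart: A's trailing while-trim of the concatenation = join of the list with its
-- trailing empty entries removed, plus one newline
theorem pv_trim_eq_join (ms : List (List Char)) (h : ∀ m ∈ ms, '\n' ∉ m) :
    pvTrim (ms.flatMap (fun l => l ++ ['\n']) ++ ['\n'])
      = PySem.Chars.join ['\n'] (pvDropTrailingEmpty ms) ++ ['\n'] := by
  induction ms using List.reverseRecOn with
  | nil =>
    rw [pvDropTrailingEmpty]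
    simp [PySem.Chars.join_nil]
    exact pv_trim_of_not_end ['\n'] (by decide)
  | append_singleton ms m ih =>
    by_cases hm : m = []
    · subst hm
      rw [pv_dropTrail_snoc_empty]
      rw [show (ms ++ [([] : List Char)]).flatMap (fun l => l ++ ['\n']) ++ ['\n']
            = ms.flatMap (fun l => l ++ ['\n']) ++ ['\n', '\n'] by simp]
      rw [pv_trim_snoc_nl]
      exact ih (fun q hq => h q (by simp [hq]))
    · rw [pv_dropTrail_snoc_ne ms m hm]
      rw [show (ms ++ [m]).flatMap (fun l => l ++ ['\n']) ++ ['\n']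
            = (ms.flatMap (fun l => l ++ ['\n']) ++ m) ++ ['\n', '\n'] by simp]
      rw [pv_trim_snoc_nl, pv_join_snoc]
      have hnl : '\n' ∉ m := h m (by simp)
      rw [show (ms.flatMap (fun l => l ++ ['\n']) ++ m) ++ ['\n']
            = ms.flatMap (fun l => l ++ ['\n']) ++ m ++ ['\n'] by simp]
      rw [pv_trim_of_not_end _ (pv_not_end_nl _ m hm hnl)]

theorem pv_ports_agree (script : String) (spaces : Int) :
    remove_additional_indent script spaces = remove_additional_indent_alt script spaces := by
  simp only [remove_additional_indent, remove_additional_indent_alt, pvSkipLeadingEmpty]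
  rw [pv_foldl_eq_flatMap]
  congr 1
  rw [show (((PySem.Chars.splitOn script.toList ['\n']).dropWhile
        (fun l => decide (l = []))).flatMap fun l => pvDedent l spaces ++ ['\n'])
      = (((PySem.Chars.splitOn script.toList ['\n']).dropWhile
        (fun l => decide (l = []))).map (fun line => pvDedent line spaces)).flatMap
          (fun l => l ++ ['\n']) by rw [List.flatMap_map]]
  apply pv_trim_eq_join
  intro m hm
  rcases List.mem_map.mp hm with ⟨l, hl, rfl⟩
  exact pv_dedent_no_nl l spaces
    (pv_splitOn_no_sep script.toList '\n' l ((List.dropWhile_suffix _).mem hl))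

-- ===== VERDICT (by name: the statement is the Claim_ definition above) =====
theorem remove_additional_indent_spec : Claim_equal_remove_additional_indent := by
  intro script spaces _
  exact pv_ports_agree script spaces
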